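-- pv_equiv track=rewrite | github.com/BenHals/AdvantageMemManagement | GenerateDatastreamFiles/generate_dataset.py | get_concepts_from_model
-- ===== SOURCE A (Python) =====
-- def get_concepts(gt_concepts, ex_index, num_samples):
--     """ Given [(gt_concept, start_i, end_i)...]
--         Return the ground truth occuring at a given index."""
--
--     gt_concept = None
--     for gt_c, s_i, e_i in gt_concepts:
--         if s_i <= ex_index < e_i:
--             gt_concept = gt_c
--             break
--     return (gt_concept)
--
-- def get_concept_by_example(num_samples, ground_truth_concepts):
--     gt_by_ex = []
--     for ex in range(num_samples):
--         sample_gt_concept = get_concepts(ground_truth_concepts, ex, num_samples)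
--         gt_by_ex.append(sample_gt_concept)
--     return gt_by_ex
--
-- def get_concepts_from_model(concept_chain, num_samples):
--     # Have a dict of {ts: concept}
--     # Transform to [(concept, start_ts, end_ts)]
--     switch_indexes = list(concept_chain.keys())
--     gt_concept = concept_chain[switch_indexes[0]]
--     start = switch_indexes[0]
--     seen_unique = []
--     ground_truth_concepts = []
--     for ts_i,ts in enumerate(switch_indexes[1:]):
--         end, new_gt_concept = ts, concept_chain[ts]
--         if gt_concept not in seen_unique:
--             seen_unique.append(gt_concept)
--         gt_concept_index = seen_unique.index(gt_concept)
--         ground_truth_concepts.append((gt_concept_index, start, end))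
--         gt_concept, start = new_gt_concept, end
--     end = num_samples
--     if gt_concept not in seen_unique:
--         seen_unique.append(gt_concept)
--     gt_concept_index = seen_unique.index(gt_concept)
--     ground_truth_concepts.append((gt_concept_index, start, end))
--
--     return get_concept_by_example(num_samples, ground_truth_concepts)
-- ===== SOURCE B (Python) =====
-- def get_concepts_from_model(concept_chain, num_samples):
--     # Walk the intervals once and fill each covered index range directly,
--     # back to front so that the earliest matching interval wins.
--     keys = list(concept_chain)
--     first_idx = {}
--     intervals = []
--     for k, nxt in zip(keys, keys[1:] + [num_samples]):
--         j = first_idx.setdefault(concept_chain[k], len(first_idx))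
--         intervals.append((j, k, nxt))
--     n = max(num_samples, 0)
--     out = [None] * n
--     for j, s, e in reversed(intervals):
--         for ex in range(max(s, 0), min(e, n)):
--             out[ex] = j
--     return out
-- ===== Notes on version B (the rewrite author's own statement) =====
-- stated objective: alternative
-- what changed: Instead of scanning the whole interval list once per sample index (A), B builds the intervals in one pass using a dict (setdefault) for first-seen concept indexing and then fills the output list range-by-range, walking the intervals back to front so the earliest matching interval wins.
import Mathlib
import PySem

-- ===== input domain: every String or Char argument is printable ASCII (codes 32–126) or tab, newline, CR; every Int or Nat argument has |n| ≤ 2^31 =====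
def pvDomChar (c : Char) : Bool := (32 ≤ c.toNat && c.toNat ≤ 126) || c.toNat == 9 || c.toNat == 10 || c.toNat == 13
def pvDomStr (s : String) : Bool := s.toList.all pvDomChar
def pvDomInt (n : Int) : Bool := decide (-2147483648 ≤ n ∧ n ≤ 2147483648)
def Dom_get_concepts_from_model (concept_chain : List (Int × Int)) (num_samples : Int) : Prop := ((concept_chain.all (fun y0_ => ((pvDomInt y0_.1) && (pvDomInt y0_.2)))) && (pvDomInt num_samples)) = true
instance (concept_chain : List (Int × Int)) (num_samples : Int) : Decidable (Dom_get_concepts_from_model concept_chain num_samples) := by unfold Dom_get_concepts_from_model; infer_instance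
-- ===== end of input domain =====

-- B builds the interval list in one pass (dict-based first-seen concept indexing) and
-- fills the output list range-by-range back to front, instead of A's per-index scan of
-- every interval. Equivalence is about the return value; neither version mutates its input.


-- ===== PORT A =====
-- get_concepts: first interval (gt_c, s_i, e_i) with s_i <= ex_index < e_i (the loop breaks on the first hit)
def pyGetConcepts : List (Int × Int × Int) → Int → Option Int
  | [], _ => none
  | (c, s, e) :: rest, ex => if s ≤ ex ∧ ex < e then some c else pyGetConcepts rest ex

-- get_concept_by_example: append get_concepts(...) for every ex in range(num_samples)
def pyGetConceptByExample (num_samples : Int) (gtc : List (Int × Int × Int)) : List (Option Int) :=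
  (PySem.List.pyRange 0 num_samples 1).foldl (fun acc ex => acc ++ [pyGetConcepts gtc ex]) []

-- body of A's for-loop over switch_indexes[1:]; state = (gt_concept, start, seen_unique, ground_truth_concepts)
def aStep (d : PySem.Dict Int Int) (st : Int × Int × PySem.Set Int × List (Int × Int × Int))
    (ts : Int) : Int × Int × PySem.Set Int × List (Int × Int × Int) :=
  let new_gt := PySem.Dict.getD d ts 0
  let seen' := PySem.Set.add st.2.2.1 st.1
  let idx : Int := ((PySem.List.index? seen' st.1).getD 0 : Nat)
  (new_gt, ts, seen', st.2.2.2 ++ [(idx, st.2.1, ts)])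

def get_concepts_from_model (concept_chain : List (Int × Int)) (num_samples : Int) : List (Option Int) :=
  let d := PySem.Dict.mk concept_chain
  let switch_indexes := PySem.Dict.keys d
  let gt_concept := PySem.Dict.getD d (PySem.List.pyGetD switch_indexes 0 0) 0
  let start := PySem.List.pyGetD switch_indexes 0 0
  let st := (PySem.List.slice switch_indexes (some 1) none).foldl (aStep d) (gt_concept, start, [], [])
  let seen' := PySem.Set.add st.2.2.1 st.1
  let idx : Int := ((PySem.List.index? seen' st.1).getD 0 : Nat)
  pyGetConceptByExample num_samples (st.2.2.2 ++ [(idx, st.2.1, num_samples)])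

-- ===== PORT B =====
-- out[ex] = j for ex in range(max(s, 0), min(e, n))
def fillInterval (n : Int) (out : List (Option Int)) (iv : Int × Int × Int) : List (Option Int) :=
  (PySem.List.pyRange (max iv.2.1 0) (min iv.2.2 n) 1).foldl
    (fun o ex => PySem.List.pySetD o ex (some iv.1)) out

-- body of B's interval-building loop; state = (first_idx, intervals); p = (k, nxt)
def bStep (d : PySem.Dict Int Int) (st : PySem.Dict Int Int × List (Int × Int × Int))
    (p : Int × Int) : PySem.Dict Int Int × List (Int × Int × Int) :=
  let c := PySem.Dict.getD d p.1 0
  let j : Int := PySem.Dict.getD st.1 c ((PySem.Dict.size st.1 : Nat) : Int)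
  let fi' := PySem.Dict.setdefault st.1 c ((PySem.Dict.size st.1 : Nat) : Int)
  (fi', st.2 ++ [(j, p.1, p.2)])

def get_concepts_from_model_alt (concept_chain : List (Int × Int)) (num_samples : Int) : List (Option Int) :=
  let d := PySem.Dict.mk concept_chain
  let keys := PySem.Dict.keys d
  let st := (keys.zip (keys.drop 1 ++ [num_samples])).foldl (bStep d) (PySem.Dict.empty, [])
  let n := max num_samples 0
  st.2.reverse.foldl (fillInterval n) (List.replicate n.toNat (none : Option Int))

-- ===== PRECONDITION & SPEC =====
-- A indexes switch_indexes[0]: on an empty concept_chain it raises IndexError; Pre_ excludes exactly that.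
def Pre_get_concepts_from_model (concept_chain : List (Int × Int)) (num_samples : Int) : Prop :=
  concept_chain ≠ []
instance (concept_chain : List (Int × Int)) (num_samples : Int) : Decidable (Pre_get_concepts_from_model concept_chain num_samples) := by unfold Pre_get_concepts_from_model; infer_instance
def pvWitness_get_concepts_from_model : (List (Int × Int)) × Int := ([(0, 5), (3, 1)], 5)

def Spec_get_concepts_from_model (concept_chain : List (Int × Int)) (num_samples : Int) (out : List (Option Int)) : Prop := out = get_concepts_from_model_alt concept_chain num_samples
instance (concept_chain : List (Int × Int)) (num_samples : Int) (out : List (Option Int)) : Decidable (Spec_get_concepts_from_model concept_chain num_samples out) := by unfold Spec_get_concepts_from_model; infer_instance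

-- ===== CLAIM (what is proved, stated in full; the proofs are below) =====
def Claim_equal_get_concepts_from_model : Prop := ∀ (concept_chain : List (Int × Int)) (num_samples : Int), Dom_get_concepts_from_model concept_chain num_samples → Pre_get_concepts_from_model concept_chain num_samples → Spec_get_concepts_from_model concept_chain num_samples (get_concepts_from_model concept_chain num_samples)

-- ===== LEMMAS AND PROOFS =====

-- index of gt in seen_unique after the 'if gt not in seen_unique: seen_unique.append(gt)' step
def refIdx (seen : PySem.Set Int) (gt : Int) : Int :=
  ((PySem.List.index? (PySem.Set.add seen gt) gt).getD 0 : Nat)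

-- the interval list both loops build, as a structural recursion over the remaining switch points
def refIvs (g : Int → Int) (ns : Int) (seen : PySem.Set Int) (gt start : Int) :
    List Int → List (Int × Int × Int)
  | [] => [(refIdx seen gt, start, ns)]
  | ts :: rest => (refIdx seen gt, start, ts) :: refIvs g ns (PySem.Set.add seen gt) (g ts) ts rest

-- B's first_idx dict: each element of seen mapped to its position (offset k)
def idxDict (seen : List Int) (k : Nat) : PySem.Dict Int Int :=
  PySem.Dict.mk ((seen.zipIdx k).map (fun p => (p.1, ((p.2 : Nat) : Int))))

lemma aloop_eq (d : PySem.Dict Int Int) (ns : Int) :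
    ∀ (rest : List Int) (gt start : Int) (seen : PySem.Set Int) (acc : List (Int × Int × Int)),
      (rest.foldl (aStep d) (gt, start, seen, acc)).2.2.2 ++
        [((((PySem.List.index?
              (PySem.Set.add (rest.foldl (aStep d) (gt, start, seen, acc)).2.2.1
                (rest.foldl (aStep d) (gt, start, seen, acc)).1)
              (rest.foldl (aStep d) (gt, start, seen, acc)).1).getD 0 : Nat) : Int),
          (rest.foldl (aStep d) (gt, start, seen, acc)).2.1, ns)]
      = acc ++ refIvs (fun ts => d.getD ts 0) ns seen gt start rest := by
  intro rest
  induction rest with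
  | nil => intro gt start seen acc; simp [refIvs, refIdx]
  | cons ts rest ih =>
    intro gt start seen acc
    rw [List.foldl_cons]
    show ((rest.foldl (aStep d) (aStep d (gt, start, seen, acc) ts)).2.2.2 ++ _) = _
    rw [aStep]
    simp only []
    rw [ih]
    simp [refIvs, refIdx]

lemma idxDict_getD (c : Int) : ∀ (seen : List Int) (k : Nat),
    (idxDict seen k).getD c ((k + seen.length : Nat) : Int)
      = ((k + ((PySem.List.index? (PySem.Set.add seen c) c).getD 0) : Nat) : Int) := by
  intro seen
  induction seen with
  | nil => intro k; simp [idxDict, PySem.Dict.getD, PySem.Dict.get?, PySem.Set.add,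
      PySem.List.index?, PySem.Set.contains]
  | cons x xs ih =>
    intro k
    by_cases hxc : x = c
    · subst hxc
      have hmem : x ∈ x :: xs := List.mem_cons_self
      rw [PySem.Set.add_of_mem hmem]
      simp [idxDict, PySem.Dict.getD, PySem.Dict.get?, PySem.List.index?, List.idxOf?_cons]
    · have hadd : PySem.Set.add (x :: xs) c = x :: PySem.Set.add xs c := by
        by_cases hmem : c ∈ xs
        · rw [PySem.Set.add_of_mem hmem, PySem.Set.add_of_mem (by simp [hmem])]
        · rw [PySem.Set.add_of_not_mem hmem,
              PySem.Set.add_of_not_mem (by simp [hmem, Ne.symm hxc])]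
          rfl
      have hsome : ∃ i, PySem.List.index? (PySem.Set.add xs c) c = some i := by
        have : c ∈ PySem.Set.add xs c := by simp [PySem.Set.mem_add]
        simpa [PySem.List.index?, List.isSome_idxOf?, Option.isSome_iff_exists] using
          (List.isSome_idxOf?.mpr this)
      obtain ⟨i, hi⟩ := hsome
      have lhs : (idxDict (x :: xs) k).getD c ((k + (x :: xs).length : Nat) : Int)
          = (idxDict xs (k + 1)).getD c (((k + 1) + xs.length : Nat) : Int) := by
        simp only [idxDict, List.zipIdx_cons, List.map_cons, PySem.Dict.getD, PySem.Dict.get?,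
          List.find?_cons]
        have hbe : (x == c) = false := by simpa using hxc
        rw [hbe]
        have hdef : (k + (x :: xs).length) = (k + 1 + xs.length) := by simp; omega
        rw [hdef]
      rw [lhs, ih (k + 1), hadd]
      rw [show PySem.List.index? (x :: PySem.Set.add xs c) c
            = Option.map (· + 1) (PySem.List.index? (PySem.Set.add xs c) c) by
          simp [PySem.List.index?, List.idxOf?_cons, hxc]]
      rw [hi]
      simp
      omega

lemma idxDict_size (seen : List Int) : PySem.Dict.size (idxDict seen 0) = seen.length := by
  simp [idxDict, PySem.Dict.size]

lemma idxDict_setdefault (seen : List Int) (c : Int) :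
    (idxDict seen 0).setdefault c ((PySem.Dict.size (idxDict seen 0) : Nat) : Int)
      = idxDict (PySem.Set.add seen c) 0 := by
  have hkeys : (idxDict seen 0).keys = seen := by
    simp [idxDict, PySem.Dict.keys, Function.comp_def]
  by_cases hmem : c ∈ seen
  · rw [PySem.Set.add_of_mem hmem]
    rw [PySem.Dict.setdefault, if_pos]
    rw [PySem.Dict.contains_iff_mem_keys, hkeys]
    exact hmem
  · rw [PySem.Set.add_of_not_mem hmem]
    rw [PySem.Dict.setdefault, if_neg]
    · simp only [idxDict, List.zipIdx_append]
      congr 1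
      simp [PySem.Dict.size]
    · rw [PySem.Dict.contains_iff_mem_keys, hkeys]
      exact hmem

lemma idxDict_getD0 (seen : List Int) (c : Int) :
    (idxDict seen 0).getD c ((PySem.Dict.size (idxDict seen 0) : Nat) : Int) = refIdx seen c := by
  have h := idxDict_getD c seen 0
  simpa [idxDict_size, refIdx] using h

lemma bloop_eq (d : PySem.Dict Int Int) (ns : Int) :
    ∀ (rest : List Int) (k : Int) (seen : PySem.Set Int) (acc : List (Int × Int × Int)),
      (((k :: rest).zip (rest ++ [ns])).foldl (bStep d) (idxDict seen 0, acc)).2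
      = acc ++ refIvs (fun ts => d.getD ts 0) ns seen (d.getD k 0) k rest := by
  intro rest
  induction rest with
  | nil =>
    intro k seen acc
    simp [bStep, refIvs, idxDict_getD0]
  | cons k' rest ih =>
    intro k seen acc
    show ((((k, k') :: ((k' :: rest).zip (rest ++ [ns]))).foldl (bStep d) (idxDict seen 0, acc)).2) = _
    rw [List.foldl_cons]
    rw [show bStep d (idxDict seen 0, acc) (k, k')
          = (idxDict (PySem.Set.add seen (d.getD k 0)) 0,
             acc ++ [(refIdx seen (d.getD k 0), k, k')]) by
        simp [bStep, idxDict_getD0, idxDict_setdefault]]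
    rw [ih k' (PySem.Set.add seen (d.getD k 0)) (acc ++ [(refIdx seen (d.getD k 0), k, k')])]
    simp [refIvs]

lemma fill_key (v : Option Int) (b : Int) :
    ∀ (m : Nat) (a : Int) (o : List (Option Int)) (p : Nat), (b - a).toNat ≤ m → 0 ≤ a → b ≤ o.length →
      ((PySem.List.pyRange a b 1).foldl (fun o ex => PySem.List.pySetD o ex v) o)[p]?
        = if a ≤ (p : Int) ∧ (p : Int) < b then some v else o[p]? := by
  intro m
  induction m with
  | zero =>
    intro a o p hm ha hb
    rw [PySem.List.pyRange_one_eq_nil (by omega)]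
    simp only [List.foldl_nil]
    rw [if_neg (by omega)]
  | succ m ih =>
    intro a o p hm ha hb
    by_cases hab : a < b
    · rw [PySem.List.pyRange_one_cons hab, List.foldl_cons]
      rw [ih (a + 1) (PySem.List.pySetD o a v) p (by omega) (by omega)
            (by rw [PySem.List.length_pySetD]; omega)]
      rw [PySem.List.pySetD_of_nonneg o v ha, List.getElem?_set]
      have hcast : ((a.toNat : Int)) = a := Int.toNat_of_nonneg ha
      rcases Nat.lt_or_ge p o.length with hp | hp
      · split_ifs <;> first | rfl | omega
      · rw [List.getElem?_eq_none (by simpa using hp)]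
        split_ifs <;> first | rfl | omega
    · rw [PySem.List.pyRange_one_eq_nil (by omega)]
      simp only [List.foldl_nil]
      rw [if_neg (by omega)]

lemma fill_getElem? (v : Option Int) (b : Int) (a : Int) (o : List (Option Int)) (p : Nat)
    (ha : 0 ≤ a) (hb : b ≤ o.length) :
    ((PySem.List.pyRange a b 1).foldl (fun o ex => PySem.List.pySetD o ex v) o)[p]?
      = if a ≤ (p : Int) ∧ (p : Int) < b then some v else o[p]? :=
  fill_key v b (b - a).toNat a o p le_rfl ha hb

lemma fillInterval_len (n : Int) (o : List (Option Int)) (iv : Int × Int × Int) :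
    (fillInterval n o iv).length = o.length := by
  have h : ∀ (r : List Int) (o : List (Option Int)) v,
      (r.foldl (fun o ex => PySem.List.pySetD o ex v) o).length = o.length := by
    intro r
    induction r with
    | nil => intro o v; rfl
    | cons x t ih => intro o v; simp [List.foldl_cons, ih, PySem.List.length_pySetD]
  simp [fillInterval, h]

lemma fillAllR_len (n : Int) : ∀ (ivs : List (Int × Int × Int)) (o : List (Option Int)),
    (ivs.foldr (fun x acc => fillInterval n acc x) o).length = o.length := by
  intro ivs
  induction ivs with
  | nil => intro o; rfl
  | cons x t ih => intro o; rw [List.foldr_cons, fillInterval_len, ih]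

lemma fillAllR_getElem? (n : Int) :
    ∀ (ivs : List (Int × Int × Int)) (o : List (Option Int)), (o.length : Int) = n →
      ∀ p : Nat, p < o.length →
        (ivs.foldr (fun x acc => fillInterval n acc x) o)[p]?
          = match pyGetConcepts ivs (p : Int) with
            | some c => some (some c)
            | none => o[p]? := by
  intro ivs
  induction ivs with
  | nil => intro o hlen p hp; rfl
  | cons x t ih =>
    intro o hlen p hp
    obtain ⟨j, s, e⟩ := x
    rw [List.foldr_cons]
    rw [fillInterval, fill_getElem? (some j) (min e n) (max s 0) _ p (by omega)
          (by rw [fillAllR_len]; omega)]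
    rw [ih o hlen p hp]
    simp only [pyGetConcepts]
    by_cases hc : s ≤ (p : Int) ∧ (p : Int) < e
    · rw [if_pos (by omega), if_pos hc]
    · rw [if_neg (by omega), if_neg hc]

lemma scan_eq_fill (ns : Int) (ivs : List (Int × Int × Int)) :
    pyGetConceptByExample ns ivs
      = ivs.reverse.foldl (fillInterval (max ns 0)) (List.replicate (max ns 0).toNat none) := by
  rw [pyGetConceptByExample, PySem.List.foldl_append_singleton_eq_map, List.nil_append,
      List.foldl_reverse]
  apply List.ext_getElem?
  intro p
  rcases Nat.lt_or_ge p (max ns 0).toNat with hp | hp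
  · rw [fillAllR_getElem? (max ns 0) ivs _ (by simp) p (by simpa using hp)]
    rw [List.getElem?_map, PySem.List.getElem?_pyRange_one]
    rw [if_pos (by omega)]
    rw [List.getElem?_replicate, if_pos hp]
    simp only [Option.map_some, Int.zero_add]
    cases pyGetConcepts ivs (p : Int) <;> rfl
  · rw [List.getElem?_eq_none (by simp [PySem.List.length_pyRange_one]; omega),
        List.getElem?_eq_none (by simp [fillAllR_len]; omega)]

-- ===== VERDICT (by name: the statement is the Claim_ definition above) =====
theorem get_concepts_from_model_spec : Claim_equal_get_concepts_from_model := by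
  intro cc ns _ hpre
  unfold Spec_get_concepts_from_model
  cases cc with
  | nil => exact absurd rfl hpre
  | cons hd tl =>
    unfold get_concepts_from_model get_concepts_from_model_alt
    simp only [PySem.Dict.keys_mk, List.map_cons, PySem.List.pyGetD_zero_cons,
      PySem.List.slice_from_one, List.tail_cons, List.drop_succ_cons, List.drop_zero]
    rw [show (PySem.Dict.empty : PySem.Dict Int Int) = idxDict [] 0 from rfl]
    rw [bloop_eq (PySem.Dict.mk (hd :: tl)) ns (tl.map (fun p => p.1)) hd.1 [] []]
    rw [aloop_eq (PySem.Dict.mk (hd :: tl)) ns (tl.map (fun p => p.1))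
          ((PySem.Dict.mk (hd :: tl)).getD hd.1 0) hd.1 [] []]
    exact scan_eq_fill ns _
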